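-- pv_equiv track=rewrite | github.com/dplocki/aquaQ-challenge | solutions/challenge31.py | split_the_input
-- ===== SOURCE A (Python) =====
-- from typing import Generator
--
-- def split_the_input(line: str) -> Generator[str, None, None]:
--     index = 0
--     limit = len(line)
--
--     while index < limit:
--         if index < limit - 1 and line[index + 1] == "'":
--             yield line[index:index + 2]
--             index += 2
--         else:
--             yield line[index]
--             index += 1
-- ===== SOURCE B (Python) =====
-- import re
-- from typing import Generator
--
--
-- def split_the_input(line: str) -> Generator[str, None, None]:
--     yield from re.findall(r".'?", line, re.DOTALL)
-- ===== Notes on version B (the rewrite author's own statement) =====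
-- stated objective: idiomatic
-- what changed: Replaced the manual index/lookahead while-loop with a single regex tokenization via re.findall with DOTALL, whose pattern matches one character greedily followed by an optional apostrophe.
import Mathlib
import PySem

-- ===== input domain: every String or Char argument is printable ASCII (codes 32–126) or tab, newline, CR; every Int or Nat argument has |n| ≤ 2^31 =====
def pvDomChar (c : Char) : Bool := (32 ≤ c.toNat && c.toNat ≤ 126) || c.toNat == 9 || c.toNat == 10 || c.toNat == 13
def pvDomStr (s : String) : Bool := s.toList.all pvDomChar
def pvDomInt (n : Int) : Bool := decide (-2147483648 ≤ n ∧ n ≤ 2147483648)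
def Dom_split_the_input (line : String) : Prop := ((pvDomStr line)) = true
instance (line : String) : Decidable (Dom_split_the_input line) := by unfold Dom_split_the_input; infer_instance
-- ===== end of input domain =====

-- B replaces A's manual index/lookahead loop with a single regex tokenization (re.findall(".'?")); objective: idiomatic.


-- ===== PORT A =====
-- while index < limit: if index < limit-1 and line[index+1] == "'": yield line[index:index+2]; index += 2
--                      else: yield line[index]; index += 1
-- line[index] / line[index+1] are in range under the loop guard, so List.getD is exact here.
def splitA_loop (cs : List Char) (limit : Nat) (index : Nat) : List String :=
  if index < limit then
    if index < limit - 1 ∧ cs.getD (index + 1) ' ' = '\'' then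
      String.ofList (PySem.List.slice cs (some (index : Int)) (some ((index + 2 : Nat) : Int)))
        :: splitA_loop cs limit (index + 2)
    else
      String.ofList [cs.getD index ' '] :: splitA_loop cs limit (index + 1)
  else []
termination_by limit - index

def split_the_input (line : String) : List String :=
  splitA_loop line.toList line.toList.length 0

-- ===== PORT B =====
-- the regex ".'?" (DOTALL) scans left to right: one character, greedily an apostrophe after it if present
def splitB (cs : List Char) : List String :=
  match cs with
  | [] => []
  | c :: rest =>
    if rest.head? = some '\'' then String.ofList [c, '\''] :: splitB rest.tail
    else String.ofList [c] :: splitB rest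
termination_by cs.length
decreasing_by
  · simp only [List.length_cons]; rw [List.length_tail]; omega
  · simp

def split_the_input_alt (line : String) : List String :=
  splitB line.toList

-- ===== PRECONDITION & SPEC =====
def Spec_split_the_input (line : String) (out : List String) : Prop := out = split_the_input_alt line
instance (line : String) (out : List String) : Decidable (Spec_split_the_input line out) := by unfold Spec_split_the_input; infer_instance

-- ===== CLAIM (what is proved, stated in full; the proofs are below) =====
def Claim_equal_split_the_input : Prop := ∀ (line : String), Dom_split_the_input line → Spec_split_the_input line (split_the_input line)

-- ===== LEMMAS AND PROOFS =====

lemma splitA_loop_eq_splitB (cs : List Char) (n : Nat) :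
    ∀ index, cs.length - index ≤ n →
      splitA_loop cs cs.length index = splitB (cs.drop index) := by
  induction n with
  | zero =>
    intro index h
    have hge : cs.length ≤ index := by omega
    rw [splitA_loop, List.drop_eq_nil_of_le hge]
    simp [Nat.not_lt.mpr hge, splitB]
  | succ n ih =>
    intro index h
    by_cases hlt : index < cs.length
    · rw [splitA_loop, if_pos hlt]
      have hdrop : cs.drop index = cs[index] :: cs.drop (index + 1) :=
        List.drop_eq_getElem_cons hlt
      by_cases hc : index < cs.length - 1 ∧ cs.getD (index + 1) ' ' = '\''
      · have h1 : index + 1 < cs.length := by omega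
        have hdrop1 : cs.drop (index + 1) = cs[index + 1] :: cs.drop (index + 2) :=
          List.drop_eq_getElem_cons h1
        have hq : cs[index + 1] = '\'' := by
          have := hc.2; rwa [List.getD_eq_getElem cs ' ' h1] at this
        rw [if_pos hc, ih (index + 2) (by omega)]
        rw [hdrop, hdrop1, hq]
        rw [splitB]
        simp only [List.head?_cons, List.tail_cons]
        congr 1
        have hslice : PySem.List.slice cs (some (index : Int)) (some ((index + 2 : Nat) : Int))
            = (cs.drop index).take 2 := by
          rw [PySem.List.slice_natCast]; congr 1; omega
        rw [hslice, hdrop, hdrop1, hq]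
        rfl
      · rw [if_neg hc, ih (index + 1) (by omega), hdrop]
        have hhd : ¬ (cs.drop (index + 1)).head? = some '\'' := by
          intro hq
          apply hc
          cases hd : cs.drop (index + 1) with
          | nil => rw [hd] at hq; simp at hq
          | cons d rest =>
            rw [hd] at hq
            have hdq : d = '\'' := by injection hq
            have h1 : index + 1 < cs.length := by
              by_contra hk
              rw [List.drop_eq_nil_of_le (by omega)] at hd
              simp at hd
            refine ⟨by omega, ?_⟩
            rw [List.getD_eq_getElem cs ' ' h1]
            have hdx : cs[index + 1] = d := by
              rw [List.drop_eq_getElem_cons h1] at hd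
              exact (List.cons.injEq _ _ _ _ ▸ hd).1
            rw [hdx, hdq]
        rw [splitB, if_neg hhd, List.getD_eq_getElem cs ' ' hlt]
    · rw [splitA_loop, if_neg hlt, List.drop_eq_nil_of_le (by omega)]
      simp [splitB]

-- ===== VERDICT (by name: the statement is the Claim_ definition above) =====
theorem split_the_input_spec : Claim_equal_split_the_input := by
  intro line _
  unfold Spec_split_the_input split_the_input split_the_input_alt
  rw [splitA_loop_eq_splitB line.toList line.toList.length 0 (by omega)]
  rfl
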